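-- pv_equiv track=rewrite | github.com/bardpedersen/INF120 | Chapter 8/8.7.py | same_rank
-- ===== SOURCE A (Python) =====
-- def same_rank(hand, n_of_a_kind):
--     ranks = [card[1:] for card in hand]
--     counter = 0
--     already_counted = []
--     for rank in ranks:
--         if rank not in already_counted and ranks.count(rank) == n_of_a_kind:
--             counter += 1
--             already_counted.append(rank)
--     return counter
-- ===== SOURCE B (Python) =====
-- def same_rank(hand, n_of_a_kind):
--     # sort the ranks, then count maximal runs of equal ranks whose length is n_of_a_kind
--     ranks = sorted(card[1:] for card in hand)
--     total = 0
--     i = 0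
--     while i < len(ranks):
--         j = i + 1
--         while j < len(ranks) and ranks[j] == ranks[i]:
--             j += 1
--         if j - i == n_of_a_kind:
--             total += 1
--         i = j
--     return total
-- ===== Notes on version B (the rewrite author's own statement) =====
-- stated objective: faster
-- what changed: replaces A's per-element full-list .count scans plus a seen-list membership check with a single sort followed by one linear pass counting maximal runs of equal ranks
import Mathlib
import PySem

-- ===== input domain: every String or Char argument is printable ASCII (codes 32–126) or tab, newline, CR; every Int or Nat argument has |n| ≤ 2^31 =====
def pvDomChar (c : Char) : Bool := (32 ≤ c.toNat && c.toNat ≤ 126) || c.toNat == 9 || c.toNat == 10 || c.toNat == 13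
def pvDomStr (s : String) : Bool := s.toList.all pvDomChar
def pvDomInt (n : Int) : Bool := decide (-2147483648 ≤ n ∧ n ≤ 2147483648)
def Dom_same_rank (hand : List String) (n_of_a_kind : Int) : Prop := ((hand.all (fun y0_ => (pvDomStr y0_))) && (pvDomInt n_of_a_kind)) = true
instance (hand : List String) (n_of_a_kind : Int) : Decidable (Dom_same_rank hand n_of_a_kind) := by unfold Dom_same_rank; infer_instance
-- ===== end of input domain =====

-- B replaces A's quadratic per-element count scans with sort + one linear run-counting pass (faster).


-- ===== PORT A =====
def same_rank (hand : List String) (n_of_a_kind : Int) : Int :=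
  let ranks := hand.map (fun card => PySem.Str.slice card (some 1) none)
  (ranks.foldl
    (fun (st : Int × List String) rank =>
      if ¬ st.2.contains rank ∧ (ranks.count rank : Int) = n_of_a_kind then
        (st.1 + 1, st.2 ++ [rank])
      else st)
    (0, [])).1

-- ===== PORT B =====
-- outer while-loop of B: one iteration per maximal run of equal ranks in the sorted list
def runCount (n : Int) : List String → Int
  | [] => 0
  | x :: xs =>
    (if ((xs.takeWhile (fun y => y == x)).length + 1 : Int) = n then 1 else 0)
      + runCount n (xs.dropWhile (fun y => y == x))
  termination_by l => l.length
  decreasing_by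
    simpa using Nat.lt_succ_of_le (List.dropWhile_sublist _).length_le

def same_rank_alt (hand : List String) (n_of_a_kind : Int) : Int :=
  runCount n_of_a_kind
    (PySem.List.sorted (hand.map (fun card => PySem.Str.slice card (some 1) none)) (fun x => x) false)

-- ===== PRECONDITION & SPEC =====
def Spec_same_rank (hand : List String) (n_of_a_kind : Int) (out : Int) : Prop := out = same_rank_alt hand n_of_a_kind
instance (hand : List String) (n_of_a_kind : Int) (out : Int) : Decidable (Spec_same_rank hand n_of_a_kind out) := by unfold Spec_same_rank; infer_instance

-- ===== CLAIM (what is proved, stated in full; the proofs are below) =====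
def Claim_equal_same_rank : Prop := ∀ (hand : List String) (n_of_a_kind : Int), Dom_same_rank hand n_of_a_kind → Spec_same_rank hand n_of_a_kind (same_rank hand n_of_a_kind)

-- ===== LEMMAS AND PROOFS =====

-- the common value: number of distinct ranks whose multiplicity in s is exactly n
def distinctWithCount (s : List String) (n : Int) : Int :=
  ((s.toFinset.filter (fun r => (s.count r : Int) = n)).card : Int)

-- A's loop invariant
theorem loopA (full : List String) (n : Int) :
    ∀ (l : List String) (c : Int) (al : List String),
      (l.foldl
        (fun (st : Int × List String) rank =>
          if ¬ st.2.contains rank ∧ (full.count rank : Int) = n then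
            (st.1 + 1, st.2 ++ [rank])
          else st)
        (c, al)).1
      = c + (((l.toFinset \ al.toFinset).filter (fun r => (full.count r : Int) = n)).card : Int) := by
  intro l
  induction l with
  | nil => simp
  | cons r l ih =>
    intro c al
    simp only [List.foldl_cons]
    by_cases h1 : al.contains r
    · rw [if_neg (by simp_all)]
      rw [ih c al]
      have hset : (r :: l).toFinset \ al.toFinset = l.toFinset \ al.toFinset := by
        ext x
        simp only [Finset.mem_sdiff, List.mem_toFinset, List.toFinset_cons, Finset.mem_insert]
        have hr : r ∈ al := by simpa using h1
        constructor
        · rintro ⟨hx | hx, hna⟩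
          · exact absurd (hx ▸ hr) hna
          · exact ⟨hx, hna⟩
        · rintro ⟨hx, hna⟩; exact ⟨Or.inr hx, hna⟩
      rw [hset]
    · by_cases h2 : (full.count r : Int) = n
      · rw [if_pos ⟨by simpa using h1, h2⟩]
        rw [ih (c + 1) (al ++ [r])]
        have hr : r ∉ al := by simpa using h1
        have hset : ((r :: l).toFinset \ al.toFinset).filter (fun x => (full.count x : Int) = n)
            = insert r ((l.toFinset \ (al ++ [r]).toFinset).filter (fun x => (full.count x : Int) = n)) := by
          ext x
          have hr : r ∉ al := by simpa using h1
          simp only [Finset.mem_filter, Finset.mem_sdiff, List.mem_toFinset, List.toFinset_cons,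
            Finset.mem_insert, List.toFinset_append, Finset.mem_union]
          by_cases hxr : x = r
          · subst hxr; simp [hr, h2]
          · simp [hxr]
        rw [hset, Finset.card_insert_of_notMem (by simp)]
        push_cast
        ring
      · rw [if_neg (by tauto)]
        rw [ih c al]
        have hset : ((r :: l).toFinset \ al.toFinset).filter (fun x => (full.count x : Int) = n)
            = (l.toFinset \ al.toFinset).filter (fun x => (full.count x : Int) = n) := by
          ext x
          simp only [Finset.mem_filter, Finset.mem_sdiff, List.mem_toFinset, List.toFinset_cons,
            Finset.mem_insert]
          constructor
          · rintro ⟨⟨hx | hx, hna⟩, hp⟩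
            · exact absurd (hx ▸ hp) h2
            · exact ⟨⟨hx, hna⟩, hp⟩
          · rintro ⟨⟨hx, hna⟩, hp⟩; exact ⟨⟨Or.inr hx, hna⟩, hp⟩
        rw [hset]

-- head of a dropWhile fails the predicate
theorem head_drop_false (p : String → Bool) :
    ∀ (l l' : List String) (z : String), l.dropWhile p = z :: l' → p z = false := by
  intro l
  induction l with
  | nil => intro l' z h; simp at h
  | cons a l ih =>
    intro l' z h
    by_cases hpa : p a
    · rw [List.dropWhile_cons_of_pos hpa] at h; exact ih l' z h
    · rw [List.dropWhile_cons_of_neg hpa] at h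
      cases h; simpa using hpa

-- one step of B's run recursion on a sorted list
theorem runB_step (n : Int) (x : String) (xs : List String)
    (hp : (x :: xs).Pairwise (fun a b => a ≤ b)) :
    distinctWithCount (x :: xs) n =
      (if ((xs.takeWhile (fun y => y == x)).length + 1 : Int) = n then 1 else 0)
        + distinctWithCount (xs.dropWhile (fun y => y == x)) n := by
  set a := xs.takeWhile (fun y => y == x) with ha
  set b := xs.dropWhile (fun y => y == x) with hb
  have hsplit : a ++ b = xs := by rw [ha, hb]; exact List.takeWhile_append_dropWhile
  have hax : ∀ y ∈ a, y = x := by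
    intro y hy
    rw [ha] at hy
    exact eq_of_beq (List.mem_takeWhile_imp (p := fun y => y == x) hy)
  have hxle : ∀ y ∈ xs, x ≤ y := (List.pairwise_cons.mp hp).1
  have hxs_pair : xs.Pairwise (fun a b => a ≤ b) := (List.pairwise_cons.mp hp).2
  have hb_pair : b.Pairwise (fun a b => a ≤ b) := hxs_pair.sublist (List.dropWhile_sublist _)
  have hbsub : ∀ y ∈ b, y ∈ xs := fun y hy => (List.dropWhile_sublist _).mem hy
  have hxb : x ∉ b := by
    intro hxbmem
    cases hbb : b with
    | nil => rw [hbb] at hxbmem; exact List.not_mem_nil hxbmem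
    | cons z zs =>
      have hzfail : (fun y => y == x) z = false :=
        head_drop_false _ xs zs z (hb.symm.trans hbb)
      have hzx : z ≠ x := by simpa using hzfail
      have hzle : x ≤ z := hxle z (hbsub z (by rw [hbb]; simp))
      rw [hbb] at hxbmem hb_pair
      rcases List.mem_cons.mp hxbmem with h | h
      · exact hzx h.symm
      · exact hzx (le_antisymm ((List.pairwise_cons.mp hb_pair).1 x h) hzle)
  have hca : a.count x = a.length := by
    rw [List.count_eq_length]; intro y hy; exact (hax y hy) ▸ rfl
  have hcx : (x :: xs).count x = a.length + 1 := by
    rw [List.count_cons_self, ← hsplit, List.count_append, hca, List.count_eq_zero.mpr hxb]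
  have hcr : ∀ r, r ≠ x → (x :: xs).count r = b.count r := by
    intro r hr
    have hcar : a.count r = 0 := by
      rw [List.count_eq_zero]
      intro hmem
      exact hr (hax r hmem)
    simp [← hsplit, List.count_cons, List.count_append, hcar]
    exact Ne.symm hr
  have hfin : (x :: xs).toFinset = insert x b.toFinset := by
    ext y
    simp only [List.toFinset_cons, Finset.mem_insert, List.mem_toFinset, ← hsplit,
      List.mem_append]
    constructor
    · rintro (h | h | h)
      · exact Or.inl h
      · exact Or.inl (hax y h)
      · exact Or.inr h
    · rintro (h | h)
      · exact Or.inl h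
      · exact Or.inr (Or.inr h)
  have hxbf : x ∉ b.toFinset := by simpa using hxb
  have hfilt : b.toFinset.filter (fun r => ((x :: xs).count r : Int) = n)
      = b.toFinset.filter (fun r => (b.count r : Int) = n) := by
    apply Finset.filter_congr
    intro r hrb
    have hrx : r ≠ x := by
      intro h
      exact hxb (h ▸ (List.mem_toFinset.mp hrb))
    rw [hcr r hrx]
  unfold distinctWithCount
  rw [hfin, Finset.filter_insert, hfilt]
  by_cases hP : ((x :: xs).count x : Int) = n
  · rw [if_pos hP]
    rw [Finset.card_insert_of_notMem (fun h => hxbf (Finset.mem_filter.mp h).1)]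
    rw [if_pos (by rw [← hP, hcx]; push_cast; ring)]
    push_cast
    ring
  · rw [if_neg hP]
    rw [if_neg (by rw [hcx] at hP; push_cast at hP ⊢; omega)]
    ring

-- B's run recursion computes distinctWithCount on a sorted list
theorem loopB (n : Int) :
    ∀ (s : List String), s.Pairwise (fun a b => a ≤ b) → runCount n s = distinctWithCount s n := by
  have H : ∀ (k : Nat) (s : List String), s.length ≤ k → s.Pairwise (fun a b => a ≤ b) →
      runCount n s = distinctWithCount s n := by
    intro k
    induction k with
    | zero =>
      intro s hl _
      have hnil : s = [] := List.eq_nil_of_length_eq_zero (Nat.le_zero.mp hl)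
      subst hnil
      simp [runCount, distinctWithCount]
    | succ k ih =>
      intro s hl hp
      match s with
      | [] => simp [runCount, distinctWithCount]
      | x :: xs =>
        rw [runCount, runB_step n x xs hp]
        congr 1
        apply ih
        · calc (xs.dropWhile (fun y => y == x)).length
              ≤ xs.length := (List.dropWhile_sublist _).length_le
            _ ≤ k := by simpa using hl
        · exact ((List.pairwise_cons.mp hp).2).sublist (List.dropWhile_sublist _)
  intro s hs
  exact H s.length s le_rfl hs

-- distinctWithCount is permutation invariant
theorem distinctWithCount_perm {s t : List String} (h : s.Perm t) (n : Int) :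
    distinctWithCount s n = distinctWithCount t n := by
  unfold distinctWithCount
  have ht : s.toFinset = t.toFinset := by ext x; simp [h.mem_iff]
  rw [ht]
  congr 2
  apply Finset.filter_congr
  intro r _
  simp [h.count_eq]

-- ===== VERDICT (by name: the statement is the Claim_ definition above) =====
theorem same_rank_spec : Claim_equal_same_rank := by
  intro hand n _
  unfold Spec_same_rank same_rank same_rank_alt
  set ranks := hand.map (fun card => PySem.Str.slice card (some 1) none) with hr
  have hA := loopA ranks n ranks 0 []
  simp only [List.toFinset_nil, Finset.sdiff_empty] at hA
  have hperm : (PySem.List.sorted ranks (fun x => x) false).Perm ranks :=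
    PySem.List.sorted_perm ..
  have hsorted : (PySem.List.sorted ranks (fun x => x) false).Pairwise (· ≤ ·) :=
    PySem.List.sorted_pairwise ..
  rw [hA, loopB n _ hsorted, distinctWithCount_perm hperm n]
  simp [distinctWithCount]
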